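-- pv_equiv track=rewrite | github.com/jager47X/ARF | preprocess/uscis_policy_manual/update_uscis_policy_manual.py | deep_compare_clauses
-- ===== SOURCE A (Python) =====
-- from typing import Any, Dict, List, Tuple
--
-- def deep_compare_clauses(clauses1: List[Dict], clauses2: List[Dict]) -> bool:
--     """Deep compare two clause arrays."""
--     if len(clauses1) != len(clauses2):
--         return False
--
--     for c1, c2 in zip(clauses1, clauses2):
--         if c1.get("number") != c2.get("number"):
--             return False
--         if c1.get("title", "").strip() != c2.get("title", "").strip():
--             return False
--         if c1.get("text", "").strip() != c2.get("text", "").strip():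
--             return False
--
--     return True
-- ===== SOURCE B (Python) =====
-- def deep_compare_clauses(clauses1, clauses2):
--     """Field-major deep compare: compare each field's whole column across the lists."""
--     def column(cs, key):
--         if key == "number":
--             return [c.get("number") for c in cs]
--         return [c.get(key, "").strip() for c in cs]
--     return all(column(clauses1, k) == column(clauses2, k)
--                for k in ("number", "title", "text"))
-- ===== Notes on version B (the rewrite author's own statement) =====
-- stated objective: alternative
-- what changed: Replaced A's clause-major zip loop with per-pair early returns by a field-major (transposed) traversal: extract each field's entire column (number, stripped title, stripped text) from both lists in staged passes and compare the three column lists; the length check is subsumed by column inequality.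
import Mathlib
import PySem

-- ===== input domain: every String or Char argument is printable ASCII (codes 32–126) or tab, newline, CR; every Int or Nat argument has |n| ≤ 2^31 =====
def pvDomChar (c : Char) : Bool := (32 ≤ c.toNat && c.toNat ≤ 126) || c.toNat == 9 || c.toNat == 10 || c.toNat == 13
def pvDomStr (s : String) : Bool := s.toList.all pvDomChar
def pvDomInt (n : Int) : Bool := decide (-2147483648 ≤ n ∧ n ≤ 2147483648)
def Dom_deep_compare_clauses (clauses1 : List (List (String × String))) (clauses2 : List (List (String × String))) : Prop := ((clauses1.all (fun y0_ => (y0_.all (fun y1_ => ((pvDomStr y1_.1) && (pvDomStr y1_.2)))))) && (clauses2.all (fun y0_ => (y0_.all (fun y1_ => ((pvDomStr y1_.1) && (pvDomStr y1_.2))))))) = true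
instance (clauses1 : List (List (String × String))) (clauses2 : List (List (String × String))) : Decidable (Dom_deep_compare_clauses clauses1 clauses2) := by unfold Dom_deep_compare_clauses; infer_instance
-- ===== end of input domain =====

-- B replaces A's clause-major zip loop by a field-major (transposed) traversal: build each
-- field's whole column for both lists and compare the three column lists (alternative decomposition).

-- ===== PORT A =====
-- the per-pair loop body of A, with its early returns, over zip(clauses1, clauses2)
def dcLoopA : List ((List (String × String)) × (List (String × String))) → Bool
  | [] => true
  | (c1, c2) :: rest =>
    if (PySem.Dict.mk c1).get? "number" ≠ (PySem.Dict.mk c2).get? "number" then false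
    else if PySem.Str.strip ((PySem.Dict.mk c1).getD "title" "") ≠ PySem.Str.strip ((PySem.Dict.mk c2).getD "title" "") then false
    else if PySem.Str.strip ((PySem.Dict.mk c1).getD "text" "") ≠ PySem.Str.strip ((PySem.Dict.mk c2).getD "text" "") then false
    else dcLoopA rest

def deep_compare_clauses (clauses1 : List (List (String × String))) (clauses2 : List (List (String × String))) : Bool :=
  if clauses1.length ≠ clauses2.length then false
  else dcLoopA (clauses1.zip clauses2)

-- ===== PORT B =====
-- the "number" column of a clause list (c.get("number") for each clause)
def dcColNum (cs : List (List (String × String))) : List (Option String) :=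
  cs.map (fun c => (PySem.Dict.mk c).get? "number")

-- the stripped column of field `key` (c.get(key, "").strip() for each clause)
def dcColStr (key : String) (cs : List (List (String × String))) : List String :=
  cs.map (fun c => PySem.Str.strip ((PySem.Dict.mk c).getD key ""))

def deep_compare_clauses_alt (clauses1 : List (List (String × String))) (clauses2 : List (List (String × String))) : Bool :=
  (dcColNum clauses1 == dcColNum clauses2)
    && (dcColStr "title" clauses1 == dcColStr "title" clauses2)
    && (dcColStr "text" clauses1 == dcColStr "text" clauses2)

-- ===== PRECONDITION & SPEC =====
def Spec_deep_compare_clauses (clauses1 : List (List (String × String))) (clauses2 : List (List (String × String))) (out : Bool) : Prop := out = deep_compare_clauses_alt clauses1 clauses2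
instance (clauses1 : List (List (String × String))) (clauses2 : List (List (String × String))) (out : Bool) : Decidable (Spec_deep_compare_clauses clauses1 clauses2 out) := by unfold Spec_deep_compare_clauses; infer_instance

-- ===== CLAIM (what is proved, stated in full; the proofs are below) =====
def Claim_equal_deep_compare_clauses : Prop := ∀ (clauses1 : List (List (String × String))) (clauses2 : List (List (String × String))), Dom_deep_compare_clauses clauses1 clauses2 → Spec_deep_compare_clauses clauses1 clauses2 (deep_compare_clauses clauses1 clauses2)

-- ===== LEMMAS AND PROOFS =====
-- A's zipped early-return loop equals the conjunction of the three column equalities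
-- (for length-equal lists; traversal order does not matter because all checks are pure equalities).
lemma dcLoopA_eq_cols (l1 l2 : List (List (String × String))) (h : l1.length = l2.length) :
    dcLoopA (l1.zip l2)
      = ((dcColNum l1 == dcColNum l2)
          && (dcColStr "title" l1 == dcColStr "title" l2)
          && (dcColStr "text" l1 == dcColStr "text" l2)) := by
  induction l1 generalizing l2 with
  | nil =>
    cases l2 with
    | nil => simp [dcLoopA, dcColNum, dcColStr]
    | cons b l2 => simp at h
  | cons a l1 ih =>
    cases l2 with
    | nil => simp at h
    | cons b l2 =>
      simp only [List.length_cons, Nat.add_right_cancel_iff] at h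
      simp only [List.zip_cons_cons, dcLoopA, dcColNum, dcColStr, List.map_cons] at *
      by_cases h1 : (PySem.Dict.mk a).get? "number" = (PySem.Dict.mk b).get? "number"
      · by_cases h2 : PySem.Str.strip ((PySem.Dict.mk a).getD "title" "") = PySem.Str.strip ((PySem.Dict.mk b).getD "title" "")
        · by_cases h3 : PySem.Str.strip ((PySem.Dict.mk a).getD "text" "") = PySem.Str.strip ((PySem.Dict.mk b).getD "text" "")
          · simp [h1, h2, h3, ih l2 h]
          · simp [h1, h2, h3]
        · simp [h1, h2]
      · simp [h1]

-- ===== VERDICT (by name: the statement is the Claim_ definition above) =====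
theorem deep_compare_clauses_spec : Claim_equal_deep_compare_clauses := by
  intro c1 c2 _
  unfold Spec_deep_compare_clauses deep_compare_clauses deep_compare_clauses_alt
  by_cases h : c1.length = c2.length
  · simp [h, dcLoopA_eq_cols c1 c2 h]
  · have hn : dcColNum c1 ≠ dcColNum c2 := by
      intro he
      exact h (by simpa [dcColNum] using congrArg List.length he)
    simp [h, hn]
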